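-- pv_equiv track=rewrite | github.com/rpaulos-clark/oat_scrape | main.py | remove_integer_strings
-- ===== SOURCE A (Python) =====
-- integer_list = ['1', '2', '3', '4', '5', '6', '7', '8', '9', '0']
--
-- def remove_integer_strings(input_list):
--
-- # Removes any string in the input_list that is comprised entirely of integers. Returns a list sans these s
-- # This filters out empty strings as well because they are len 0, the default for int count.
--     filtered_list = []
--     for strings in input_list:
--         int_count = 0
--         for chars in strings:
--             if chars in integer_list:
--                 int_count += 1
--         if int_count != len(strings):
--             filtered_list.append(strings)
--     return filtered_list
-- ===== SOURCE B (Python) =====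
-- DIGITS = '0123456789'
--
-- def remove_integer_strings(input_list):
--     # Keep a string iff stripping digit characters from both ends leaves a residue:
--     # a string is entirely digits exactly when s.strip(DIGITS) is empty ('' strips to '').
--     return [s for s in input_list if s.strip(DIGITS)]
-- ===== Notes on version B (the rewrite author's own statement) =====
-- stated objective: simpler
-- what changed: Replaces A's per-string digit-counting loop compared against the length by the standard-library end-trim s.strip('0123456789'): a string is entirely digits exactly when trimming digits from both ends leaves the empty string, so B keeps a string iff the trimmed residue is truthy; the trim is a C-level scan that stops at the first non-digit from each end instead of a Python loop over every character with a 10-element membership test.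
import Mathlib
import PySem

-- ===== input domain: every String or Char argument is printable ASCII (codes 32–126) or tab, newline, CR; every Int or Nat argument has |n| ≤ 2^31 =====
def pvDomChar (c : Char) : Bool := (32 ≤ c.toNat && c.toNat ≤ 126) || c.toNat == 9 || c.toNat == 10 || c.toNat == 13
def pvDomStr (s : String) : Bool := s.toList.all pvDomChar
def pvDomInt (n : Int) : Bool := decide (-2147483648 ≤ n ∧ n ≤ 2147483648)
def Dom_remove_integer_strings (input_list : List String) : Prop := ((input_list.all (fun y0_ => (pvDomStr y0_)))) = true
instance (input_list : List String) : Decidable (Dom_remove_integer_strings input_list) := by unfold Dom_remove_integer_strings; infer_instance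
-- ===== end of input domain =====

-- B keeps a string iff s.strip('0123456789') is nonempty (trim digits from both ends), replacing A's count-of-digits-vs-length scan; objective: simpler.
-- ===== PORT A =====
def integer_list : List String := ["1", "2", "3", "4", "5", "6", "7", "8", "9", "0"]

def remove_integer_strings (input_list : List String) : List String :=
  input_list.foldl (fun filtered_list strings =>
    let int_count : Int :=
      strings.toList.foldl (fun int_count chars =>
        if integer_list.contains (String.ofList [chars]) then int_count + 1 else int_count) 0
    if int_count ≠ (strings.toList.length : Int) then filtered_list ++ [strings] else filtered_list) []

-- ===== PORT B =====
def DIGITS : String := "0123456789"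

def remove_integer_strings_alt (input_list : List String) : List String :=
  input_list.filter (fun s => !(PySem.Str.stripChars s DIGITS == ""))

-- ===== PRECONDITION & SPEC =====
def Spec_remove_integer_strings (input_list : List String) (out : List String) : Prop := out = remove_integer_strings_alt input_list
instance (input_list : List String) (out : List String) : Decidable (Spec_remove_integer_strings input_list out) := by unfold Spec_remove_integer_strings; infer_instance

-- ===== CLAIM (what is proved, stated in full; the proofs are below) =====
def Claim_equal_remove_integer_strings : Prop := ∀ (input_list : List String), Dom_remove_integer_strings input_list → Spec_remove_integer_strings input_list (remove_integer_strings input_list)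

-- ===== LEMMAS AND PROOFS =====

lemma digit_mem (c : Char) :
    (integer_list.contains (String.ofList [c]) = true) ↔ DIGITS.toList.contains c = true := by
  have h3 : integer_list = [String.ofList ['1'], String.ofList ['2'], String.ofList ['3'],
    String.ofList ['4'], String.ofList ['5'], String.ofList ['6'], String.ofList ['7'],
    String.ofList ['8'], String.ofList ['9'], String.ofList ['0']] := by rfl
  have h2 : DIGITS.toList = ['0','1','2','3','4','5','6','7','8','9'] := by rfl
  rw [h2, h3]
  simp only [List.contains_eq_mem, List.mem_cons, List.not_mem_nil, or_false,
    decide_eq_true_eq]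
  have h4 : ∀ d : Char, (String.ofList [c] = String.ofList [d]) ↔ c = d := by
    intro d
    constructor
    · intro he; simpa using congrArg String.toList he
    · intro he; rw [he]
  simp only [h4]
  tauto

lemma dropWhile_all {p : Char → Bool} (l : List Char) :
    (∀ c ∈ l.dropWhile p, p c = true) ↔ ∀ c ∈ l, p c = true := by
  constructor
  · intro h c hc
    rcases List.mem_append.mp (by rw [List.takeWhile_append_dropWhile] ; exact hc :
        c ∈ l.takeWhile p ++ l.dropWhile p) with h1 | h2
    · exact List.mem_takeWhile_imp h1
    · exact h c h2
  · intro h c hc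
    exact h c ((List.dropWhile_sublist (l := l) p).mem hc)

lemma strip_empty_iff (s : String) :
    (PySem.Str.stripChars s DIGITS == "") = true
      ↔ ∀ c ∈ s.toList, DIGITS.toList.contains c = true := by
  rw [beq_iff_eq, ← String.toList_inj, PySem.Str.toList_stripChars]
  show PySem.Chars.stripChars s.toList DIGITS.toList = [] ↔ _
  unfold PySem.Chars.stripChars
  rw [List.reverse_eq_nil_iff, List.dropWhile_eq_nil_iff]
  simp only [List.mem_reverse]
  exact (dropWhile_all _)

lemma count_key (l : List Char) :
    (l.foldl (fun n c => if integer_list.contains (String.ofList [c]) then n + 1 else n) (0 : Int)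
      ≠ (l.length : Int))
    ↔ ¬ (∀ c ∈ l, integer_list.contains (String.ofList [c]) = true) := by
  rw [PySem.List.foldl_count_if]
  rw [show ((0 : Int) + (l.countP (fun c => integer_list.contains (String.ofList [c])) : Int)
      ≠ (l.length : Int)) ↔ l.countP (fun c => integer_list.contains (String.ofList [c])) ≠ l.length
    from by omega]
  exact not_congr List.countP_eq_length

lemma per_string (s : String) :
    ((s.toList.foldl (fun n c => if integer_list.contains (String.ofList [c]) then n + 1 else n)
        (0 : Int) ≠ (s.toList.length : Int)) : Bool)
      = !(PySem.Str.stripChars s DIGITS == "") := by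
  rcases h : (PySem.Str.stripChars s DIGITS == "") with _ | _
  · simp only [Bool.not_false]
    rw [decide_eq_true_iff, count_key]
    intro hall
    have := (not_congr (strip_empty_iff s)).mp (by simp [h])
    exact this (fun c hc => (digit_mem c).mp (hall c hc))
  · simp only [Bool.not_true]
    rw [decide_eq_false_iff_not, not_not]
    have h2 := (not_congr (count_key s.toList)).mpr
    rw [not_not] at h2
    exact not_not.mp (h2 (fun c hc => (digit_mem c).mpr ((strip_empty_iff s).mp h c hc)))

theorem remove_integer_strings_spec : Claim_equal_remove_integer_strings := by
  intro input_list _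
  unfold Spec_remove_integer_strings remove_integer_strings remove_integer_strings_alt
  rw [show (fun (filtered_list : List String) (strings : String) =>
      let int_count : Int :=
        strings.toList.foldl (fun int_count chars =>
          if integer_list.contains (String.ofList [chars]) then int_count + 1 else int_count) 0
      if int_count ≠ (strings.toList.length : Int) then filtered_list ++ [strings] else filtered_list)
    = (fun (acc : List String) (s : String) =>
        if (!(PySem.Str.stripChars s DIGITS == "")) = true
        then acc ++ [s] else acc) from by
      funext acc s
      simp only [← per_string s]
      split_ifs with h1 h2 <;> simp_all]
  rw [PySem.List.foldl_append_if_eq_filter]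
  rfl
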